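-- pv_equiv track=rewrite | github.com/m1Myp/selector | block_preprocessing.py | merge_with_base_dict
-- ===== SOURCE A (Python) =====
-- def merge_with_base_dict(base_dict: dict, data_dict: dict, swap_16: dict) -> dict:
--     """
--     Объединяет данные из base_dict с данными из data_dict, используя swap_16 для преобразования ключей.
--     :param base_dict: Словарь с базовыми значениями.
--     :param data_dict: Словарь с дополнительными данными.
--     :param swap_16: Словарь для замены 16-ричных ключей на числовые индексы.
--     :return: Объединенный словарь.
--     """
--     result = {str(key): [0] * (1 + len(data_dict)) for key in swap_16.values()}
--
--     for key, base_value in base_dict.items():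
--         if key in result:
--             result[key][0] = base_value  # Заполняем значением из base_dict
--
--     for index, (path, values) in enumerate(data_dict.items()):
--         hist_values = values[0]
--         for key, value in hist_values.items():
--             if key in result:
--                 result[key][index + 1] = value  # Добавляем данные из data_dict
--
--     return result
-- ===== SOURCE B (Python) =====
-- def merge_with_base_dict(base_dict: dict, data_dict: dict, swap_16: dict) -> dict:
--     """Gather instead of scatter: build each result row in one shot from lookups."""
--     histograms = [values[0] for values in data_dict.values()]
--     result = {}
--     for key in swap_16.values():
--         k = str(key)
--         result[k] = [base_dict.get(k, 0)] + [hist.get(k, 0) for hist in histograms]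
--     return result
-- ===== Notes on version B (the rewrite author's own statement) =====
-- stated objective: simpler
-- what changed: Inverted scatter to gather: instead of zero-initializing every row and then running two scatter loops (base_dict pass, then an enumerated pass over data_dict histograms) that write into cells, B builds each result row in one shot by looking up the key in base_dict and in each histogram, so a single dict comprehension replaces the init comprehension plus two write loops.
import Mathlib
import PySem

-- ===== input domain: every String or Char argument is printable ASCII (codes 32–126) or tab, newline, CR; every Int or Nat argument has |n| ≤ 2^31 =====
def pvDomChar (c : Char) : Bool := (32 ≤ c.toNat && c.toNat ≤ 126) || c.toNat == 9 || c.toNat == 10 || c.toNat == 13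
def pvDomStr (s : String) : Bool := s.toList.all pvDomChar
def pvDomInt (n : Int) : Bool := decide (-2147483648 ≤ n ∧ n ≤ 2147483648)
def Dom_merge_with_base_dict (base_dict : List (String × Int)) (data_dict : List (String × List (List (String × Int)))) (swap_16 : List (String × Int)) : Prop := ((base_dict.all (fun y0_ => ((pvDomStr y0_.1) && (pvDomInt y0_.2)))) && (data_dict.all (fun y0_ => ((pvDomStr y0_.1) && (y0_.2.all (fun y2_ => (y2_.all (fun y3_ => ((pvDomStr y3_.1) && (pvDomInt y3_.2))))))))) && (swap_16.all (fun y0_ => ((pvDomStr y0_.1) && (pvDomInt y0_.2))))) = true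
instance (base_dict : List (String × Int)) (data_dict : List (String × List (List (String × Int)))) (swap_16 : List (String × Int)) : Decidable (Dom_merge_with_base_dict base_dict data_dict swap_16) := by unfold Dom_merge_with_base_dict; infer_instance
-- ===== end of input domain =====

-- B replaces A's zero-init + two scatter loops by a single gather loop building each row in one shot from lookups (objective: simpler).


-- ===== PORT A =====
def merge_with_base_dict (base_dict : List (String × Int)) (data_dict : List (String × List (List (String × Int)))) (swap_16 : List (String × Int)) : List (String × List Int) :=
  -- result = {str(key): [0] * (1 + len(data_dict)) for key in swap_16.values()}
  let result0 : PySem.Dict String (List Int) :=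
    swap_16.foldl (fun d p => d.insert (PySem.Int.toStr p.2) (List.replicate (1 + data_dict.length) 0)) PySem.Dict.empty
  -- for key, base_value in base_dict.items(): if key in result: result[key][0] = base_value
  let result1 :=
    base_dict.foldl (fun d p => if d.contains p.1 then d.modify p.1 [] (fun row => row.set 0 p.2) else d) result0
  -- for index, (path, values) in enumerate(data_dict.items()): hist_values = values[0]; for key, value ...
  let result2 :=
    (PySem.List.enumerate data_dict 0).foldl (fun d ip =>
      ((PySem.List.pyGet? ip.2.2 0).getD []).foldl
        (fun d p => if d.contains p.1 then d.modify p.1 [] (fun row => row.set (ip.1 + 1).toNat p.2) else d) d) result1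
  result2.items

-- ===== PORT B =====
def merge_with_base_dict_alt (base_dict : List (String × Int)) (data_dict : List (String × List (List (String × Int)))) (swap_16 : List (String × Int)) : List (String × List Int) :=
  -- histograms = [values[0] for values in data_dict.values()]
  -- {str(key): [base_dict.get(str(key), 0)] + [hist.get(str(key), 0) for hist in histograms] for key in swap_16.values()}
  (swap_16.foldl (fun d p =>
      d.insert (PySem.Int.toStr p.2)
        ((PySem.Dict.mk base_dict).getD (PySem.Int.toStr p.2) 0 ::
         (data_dict.map (fun q => (PySem.List.pyGet? q.2 0).getD [])).map
           (fun h => (PySem.Dict.mk h).getD (PySem.Int.toStr p.2) 0)))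
    PySem.Dict.empty).items

-- ===== PRECONDITION & SPEC =====
-- Pre_ excludes (a) association lists with duplicate keys, which a Python dict argument can never carry,
-- and (b) data_dict entries whose value list is empty, on which A (and B) raise IndexError at values[0].
def Pre_merge_with_base_dict (base_dict : List (String × Int)) (data_dict : List (String × List (List (String × Int)))) (swap_16 : List (String × Int)) : Prop :=
  (base_dict.map Prod.fst).Nodup ∧ (data_dict.map Prod.fst).Nodup ∧ (swap_16.map Prod.fst).Nodup ∧
  ∀ p ∈ data_dict, p.2 ≠ [] ∧ ((p.2.headD []).map Prod.fst).Nodup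
instance (base_dict : List (String × Int)) (data_dict : List (String × List (List (String × Int)))) (swap_16 : List (String × Int)) : Decidable (Pre_merge_with_base_dict base_dict data_dict swap_16) := by unfold Pre_merge_with_base_dict; infer_instance
def pvWitness_merge_with_base_dict : (List (String × Int)) × (List (String × List (List (String × Int)))) × (List (String × Int)) :=
  ([("1", 5)], [("p", [[("1", 7), ("2", 3)]])], [("a", 1), ("b", 2)])
def Spec_merge_with_base_dict (base_dict : List (String × Int)) (data_dict : List (String × List (List (String × Int)))) (swap_16 : List (String × Int)) (out : List (String × List Int)) : Prop := out = merge_with_base_dict_alt base_dict data_dict swap_16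
instance (base_dict : List (String × Int)) (data_dict : List (String × List (List (String × Int)))) (swap_16 : List (String × Int)) (out : List (String × List Int)) : Decidable (Spec_merge_with_base_dict base_dict data_dict swap_16 out) := by unfold Spec_merge_with_base_dict; infer_instance

-- ===== CLAIM (what is proved, stated in full; the proofs are below) =====
def Claim_equal_merge_with_base_dict : Prop := ∀ (base_dict : List (String × Int)) (data_dict : List (String × List (List (String × Int)))) (swap_16 : List (String × Int)), Dom_merge_with_base_dict base_dict data_dict swap_16 → Pre_merge_with_base_dict base_dict data_dict swap_16 → Spec_merge_with_base_dict base_dict data_dict swap_16 (merge_with_base_dict base_dict data_dict swap_16)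


-- ===== LEMMAS AND PROOFS =====

theorem pv_head (xs : List (List (String × Int))) (h : xs ≠ []) :
    (PySem.List.pyGet? xs 0).getD [] = xs.headD [] := by
  cases xs with
  | nil => exact absurd rfl h
  | cons a t => simp [PySem.List.pyGet?, PySem.List.pyIdx?]

theorem pv_insert_key_items (l : List (String × Int)) (F : String → List Int) :
    (l.foldl (fun d p => d.insert (PySem.Int.toStr p.2) (F (PySem.Int.toStr p.2))) PySem.Dict.empty).items
    = (PySem.Set.ofList (l.map (fun p => PySem.Int.toStr p.2))).map (fun k => (k, F k)) := by
  induction l using List.reverseRecOn with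
  | nil => rfl
  | append_singleton l' p ih =>
    rw [List.foldl_append, List.map_append]
    simp only [List.map_cons, List.map_nil]
    rw [PySem.Set.ofList_append_singleton]
    simp only [List.foldl_cons, List.foldl_nil]
    set d' := l'.foldl (fun d p => d.insert (PySem.Int.toStr p.2) (F (PySem.Int.toStr p.2))) PySem.Dict.empty with hd'
    set S := PySem.Set.ofList (l'.map (fun p => PySem.Int.toStr p.2)) with hS
    have hkeys : d'.keys = S := by
      simp only [PySem.Dict.keys, ih, List.map_map, hS]
      exact (List.map_congr_left (fun k _ => rfl)).trans (List.map_id _)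
    by_cases hmem : PySem.Int.toStr p.2 ∈ S
    · have hc : d'.contains (PySem.Int.toStr p.2) = true := by
        rw [PySem.Dict.contains_iff_mem_keys, hkeys]; exact hmem
      rw [PySem.Dict.items_insert, if_pos hc, ih, PySem.Set.add_of_mem hmem, List.map_map]
      refine List.map_congr_left ?_
      intro k hk
      by_cases h : k = PySem.Int.toStr p.2
      · simp [h]
      · simp [Function.comp, h]
    · have hc : d'.contains (PySem.Int.toStr p.2) = false := by
        rw [← Bool.not_eq_true, PySem.Dict.contains_iff_mem_keys, hkeys]; exact hmem
      rw [PySem.Dict.items_insert, if_neg (by simp [hc]), ih, PySem.Set.add_of_not_mem hmem, List.map_append]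
      rfl

theorem pv_scatter_keys (bs : List (String × Int)) (j : Nat) (d : PySem.Dict String (List Int)) :
    (bs.foldl (fun d p => if d.contains p.1 then d.modify p.1 [] (fun row => row.set j p.2) else d) d).keys = d.keys := by
  induction bs generalizing d with
  | nil => rfl
  | cons q bs ih =>
    rw [List.foldl_cons, ih]
    by_cases hc : d.contains q.1 = true
    · rw [if_pos hc, PySem.Dict.keys_modify, PySem.Dict.keys_insert_of_contains]
      exact hc
    · rw [if_neg hc]

theorem pv_scatter_contains (bs : List (String × Int)) (j : Nat) (d : PySem.Dict String (List Int)) (k : String) :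
    (bs.foldl (fun d p => if d.contains p.1 then d.modify p.1 [] (fun row => row.set j p.2) else d) d).contains k = d.contains k := by
  rw [PySem.Dict.contains_eq_decide_mem_keys, PySem.Dict.contains_eq_decide_mem_keys, pv_scatter_keys]

theorem pv_scatter_getD (bs : List (String × Int)) (j : Nat) (d : PySem.Dict String (List Int)) (k : String)
    (hnd : (bs.map Prod.fst).Nodup) :
    (bs.foldl (fun d p => if d.contains p.1 then d.modify p.1 [] (fun row => row.set j p.2) else d) d).getD k []
    = match (PySem.Dict.mk bs).get? k with
      | some v => if d.contains k then (d.getD k []).set j v else d.getD k []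
      | none => d.getD k [] := by
  induction bs generalizing d with
  | nil => simp [PySem.Dict.get?]
  | cons q bs ih =>
    obtain ⟨q1, q2⟩ := q
    simp only [List.map_cons, List.nodup_cons] at hnd
    obtain ⟨hq1, hnd'⟩ := hnd
    rw [List.foldl_cons, ih _ hnd', PySem.Dict.get?_mk_cons]
    by_cases hkq : q1 = k
    · subst hkq
      have hrest : (PySem.Dict.mk bs).get? q1 = none := by
        rw [PySem.Dict.get?_eq_none_iff_not_mem_keys]
        simpa using hq1
      simp only [hrest, beq_self_eq_true, if_true]
      by_cases hc : d.contains q1 = true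
      · rw [if_pos hc]
        simp only [hc, if_true]
        rw [PySem.Dict.getD_modify_self]
      · rw [if_neg hc]
        simp only [Bool.not_eq_true] at hc
        simp [hc]
    · have hbeq : (q1 == k) = false := by simp [hkq]
      rw [hbeq]
      simp only [Bool.false_eq_true, if_false]
      by_cases hc : d.contains q1 = true
      · rw [if_pos hc]
        have h1 : (d.modify q1 [] (fun row => row.set j q2)).getD k [] = d.getD k [] := by
          rw [PySem.Dict.getD_modify]; simp [Ne.symm hkq]
        have h2 : (d.modify q1 [] (fun row => row.set j q2)).contains k = d.contains k := by
          rw [PySem.Dict.contains_modify]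
          have hb : (k == q1) = false := by simp [Ne.symm hkq]
          rw [hb, Bool.false_or]
        rw [h1, h2]
      · rw [if_neg hc]
theorem pv_rowfold (k : String) (L : List (String × List (List (String × Int)))) :
    ∀ (i : Nat) (r : List Int), r.length = i + 1 + L.length → r.drop (i + 1) = List.replicate L.length (0:Int) →
    (PySem.List.enumerate L (i : Int)).foldl
      (fun r ip => match (PySem.Dict.mk ((PySem.List.pyGet? ip.2.2 0).getD [])).get? k with
                   | some v => r.set (ip.1 + 1).toNat v
                   | none => r) r
    = r.take (i + 1) ++ L.map (fun p => ((PySem.Dict.mk ((PySem.List.pyGet? p.2 0).getD [])).get? k).getD 0) := by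
  induction L with
  | nil =>
    intro i r hlen hdrop
    simp only [List.length_nil] at hlen
    simp [PySem.List.enumerate, List.take_of_length_le (by omega : r.length ≤ i + 1)]
  | cons p L ih =>
    intro i r hlen hdrop
    simp only [List.length_cons] at hlen hdrop
    have hcons : PySem.List.enumerate (p :: L) (i : Int) = ((i : Int), p) :: PySem.List.enumerate L ((i : Int) + 1) := by
      simp [PySem.List.enumerate]
    rw [hcons, List.foldl_cons]
    have hlt : i + 1 < r.length := by omega
    have hget : r[i+1]? = some 0 := by
      have h1 : (r.drop (i+1))[0]? = some 0 := by
        rw [hdrop]; simp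
      rw [List.getElem?_drop] at h1
      simpa using h1
    have hgetE : r[i+1]'hlt = (0:Int) := by
      have := List.getElem?_eq_getElem hlt
      rw [hget] at this
      exact (Option.some.injEq _ _).mp this.symm
    have htoNat : ((i : Int) + 1).toNat = i + 1 := by omega
    have hstep : (match (PySem.Dict.mk ((PySem.List.pyGet? p.2 0).getD [])).get? k with
                  | some v => r.set ((i:Int) + 1).toNat v
                  | none => r)
        = r.set (i+1) (((PySem.Dict.mk ((PySem.List.pyGet? p.2 0).getD [])).get? k).getD 0) := by
      rcases hh : (PySem.Dict.mk ((PySem.List.pyGet? p.2 0).getD [])).get? k with _ | v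
      · simp only [Option.getD_none]
        conv_rhs => rw [← hgetE]
        rw [List.set_getElem_self]
      · simp only [Option.getD_some, htoNat]
    rw [hstep]
    set b := ((PySem.Dict.mk ((PySem.List.pyGet? p.2 0).getD [])).get? k).getD 0 with hb
    have hcast : ((i : Int) + 1) = (((i + 1 : Nat)) : Int) := by push_cast; ring
    rw [hcast]
    have hlen' : (r.set (i+1) b).length = (i + 1) + 1 + L.length := by
      simp [List.length_set]; omega
    have hdrop' : (r.set (i+1) b).drop ((i+1) + 1) = List.replicate L.length 0 := by
      rw [List.drop_set, if_pos (by omega)]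
      have h2 : r.drop (i + 1 + 1) = (r.drop (i+1)).drop 1 := by
        rw [List.drop_drop]
      rw [h2, hdrop, List.replicate_succ]
      simp
    rw [ih (i+1) _ hlen' hdrop']
    have htake : (r.set (i+1) b).take ((i+1)+1) = r.take (i+1) ++ [b] := by
      rw [List.take_add_one, List.getElem?_set_self (by omega), List.take_set,
          List.set_eq_of_length_le (by simp [List.length_take])]
      rfl
    rw [htake, List.map_cons]
    simp
    exact hb

theorem pv_outer_keys (L : List (String × List (List (String × Int)))) :
    ∀ (i : Int) (d : PySem.Dict String (List Int)),
    ((PySem.List.enumerate L i).foldl (fun d ip =>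
      ((PySem.List.pyGet? ip.2.2 0).getD []).foldl
        (fun d p => if d.contains p.1 then d.modify p.1 [] (fun row => row.set (ip.1 + 1).toNat p.2) else d) d) d).keys
    = d.keys := by
  induction L with
  | nil => intro i d; rfl
  | cons p L ih =>
    intro i d
    have hcons : PySem.List.enumerate (p :: L) i = (i, p) :: PySem.List.enumerate L (i + 1) := by
      simp [PySem.List.enumerate]
    rw [hcons, List.foldl_cons, ih, pv_scatter_keys]

theorem pv_outer_pointwise (k : String) (L : List (String × List (List (String × Int))))
    (hnd : ∀ p ∈ L, (((PySem.List.pyGet? p.2 0).getD []).map Prod.fst).Nodup) :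
    ∀ (i : Int) (d : PySem.Dict String (List Int)),
    ((PySem.List.enumerate L i).foldl (fun d ip =>
      ((PySem.List.pyGet? ip.2.2 0).getD []).foldl
        (fun d p => if d.contains p.1 then d.modify p.1 [] (fun row => row.set (ip.1 + 1).toNat p.2) else d) d) d).getD k []
    = if d.contains k then
        (PySem.List.enumerate L i).foldl
          (fun r ip => match (PySem.Dict.mk ((PySem.List.pyGet? ip.2.2 0).getD [])).get? k with
                       | some v => r.set (ip.1 + 1).toNat v
                       | none => r) (d.getD k [])
      else d.getD k [] := by
  induction L with
  | nil =>
    intro i d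
    by_cases hc : d.contains k = true
    · simp [PySem.List.enumerate, hc]
    · simp [PySem.List.enumerate, hc]
  | cons p L ih =>
    intro i d
    have hcons : PySem.List.enumerate (p :: L) i = (i, p) :: PySem.List.enumerate L (i + 1) := by
      simp [PySem.List.enumerate]
    rw [hcons, List.foldl_cons, List.foldl_cons]
    have hndp : (((PySem.List.pyGet? p.2 0).getD []).map Prod.fst).Nodup := hnd p (List.mem_cons_self ..)
    have hnd' : ∀ q ∈ L, (((PySem.List.pyGet? q.2 0).getD []).map Prod.fst).Nodup :=
      fun q hq => hnd q (List.mem_cons_of_mem _ hq)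
    rw [ih hnd' (i+1)]
    rw [pv_scatter_contains, pv_scatter_getD _ _ _ _ hndp]
    rcases hh : (PySem.Dict.mk ((PySem.List.pyGet? p.2 0).getD [])).get? k with _ | v
    · simp only
    · by_cases hc : d.contains k = true
      · simp only [hc, if_true]
      · simp only [hc]
        simp only [Bool.false_eq_true, if_false]


-- ===== VERDICT (by name: the statement is the Claim_ definition above) =====
set_option maxHeartbeats 2000000 in
theorem merge_with_base_dict_spec : Claim_equal_merge_with_base_dict := by
  unfold Claim_equal_merge_with_base_dict
  intro bd dd sw _hdom hpre
  obtain ⟨hbd, _hdd, _hsw, hdata⟩ := hpre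
  unfold Spec_merge_with_base_dict
  simp only [merge_with_base_dict, merge_with_base_dict_alt]
  set K := PySem.Set.ofList (sw.map (fun p => PySem.Int.toStr p.2)) with hKdef
  have hB : (sw.foldl (fun d p =>
        d.insert (PySem.Int.toStr p.2)
          ((PySem.Dict.mk bd).getD (PySem.Int.toStr p.2) 0 ::
            (dd.map (fun q => (PySem.List.pyGet? q.2 0).getD [])).map
              (fun h => (PySem.Dict.mk h).getD (PySem.Int.toStr p.2) 0))) PySem.Dict.empty).items
      = K.map (fun k => (k, (PySem.Dict.mk bd).getD k 0 ::
            (dd.map (fun q => (PySem.List.pyGet? q.2 0).getD [])).map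
              (fun h => (PySem.Dict.mk h).getD k 0))) :=
    pv_insert_key_items sw (fun k => (PySem.Dict.mk bd).getD k 0 ::
      (dd.map (fun q => (PySem.List.pyGet? q.2 0).getD [])).map (fun h => (PySem.Dict.mk h).getD k 0))
  set d0 := sw.foldl (fun d p => d.insert (PySem.Int.toStr p.2) (List.replicate (1 + dd.length) (0:Int))) PySem.Dict.empty with hd0
  set d1 := bd.foldl (fun d p => if d.contains p.1 then d.modify p.1 [] (fun row => row.set 0 p.2) else d) d0 with hd1
  set d2 := (PySem.List.enumerate dd 0).foldl (fun d ip =>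
      ((PySem.List.pyGet? ip.2.2 0).getD []).foldl
        (fun d p => if d.contains p.1 then d.modify p.1 [] (fun row => row.set (ip.1 + 1).toNat p.2) else d) d) d1 with hd2
  have hA0 : d0.items = K.map (fun k => (k, List.replicate (1 + dd.length) (0:Int))) :=
    pv_insert_key_items sw (fun _ => List.replicate (1 + dd.length) (0:Int))
  have hKnd : K.Nodup := PySem.Set.nodup_ofList _
  have hK0 : d0.keys = K := by
    simp only [PySem.Dict.keys, hA0, List.map_map]
    exact (List.map_congr_left (fun k _ => rfl)).trans (List.map_id _)
  have hK1 : d1.keys = K := by rw [hd1, pv_scatter_keys]; exact hK0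
  have hK2 : d2.keys = K := by rw [hd2, pv_outer_keys]; exact hK1
  have hnd2 : d2.keys.Nodup := by rw [hK2]; exact hKnd
  rw [PySem.Dict.items_eq_map_keys d2 hnd2 [], hK2, hB]
  refine List.map_congr_left ?_
  intro k hk
  have hc0 : d0.contains k = true := by rw [PySem.Dict.contains_iff_mem_keys, hK0]; exact hk
  have hv0 : d0.getD k [] = List.replicate (1 + dd.length) 0 := by
    refine PySem.Dict.getD_of_mem_items d0 ?_ (by rw [hK0]; exact hKnd) []
    rw [hA0]
    exact List.mem_map.mpr ⟨k, hk, rfl⟩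
  have hc1 : d1.contains k = true := by rw [hd1, pv_scatter_contains]; exact hc0
  set b0 : Int := ((PySem.Dict.mk bd).get? k).getD 0 with hb0
  have hv1 : d1.getD k [] = (List.replicate (1 + dd.length) (0:Int)).set 0 b0 := by
    rw [hd1, pv_scatter_getD bd 0 d0 k hbd]
    rcases hh : (PySem.Dict.mk bd).get? k with _ | v
    · simp only [hb0, hh, Option.getD_none, hv0]
      rw [show 1 + dd.length = dd.length + 1 from by omega, List.replicate_succ, List.set_cons_zero]
    · simp only [hb0, hh, Option.getD_some, hc0, if_true, hv0]
  have hndh : ∀ p ∈ dd, (((PySem.List.pyGet? p.2 0).getD []).map Prod.fst).Nodup := by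
    intro p hp
    obtain ⟨hne, hnd⟩ := hdata p hp
    rw [pv_head _ hne]
    exact hnd
  set r1 := (List.replicate (1 + dd.length) (0:Int)).set 0 b0 with hr1
  have hlen1 : r1.length = 0 + 1 + dd.length := by simp [hr1]
  have hdrop1 : r1.drop (0 + 1) = List.replicate dd.length (0:Int) := by
    rw [hr1, List.drop_set, if_pos (by omega)]
    rw [show 1 + dd.length = dd.length + 1 from by omega, List.replicate_succ]
    simp
  have hrow := pv_rowfold k dd 0 r1 hlen1 hdrop1
  have htake1 : r1.take (0 + 1) = [b0] := by
    rw [hr1, List.take_add_one, List.getElem?_set_self (by simp)]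
    simp
  rw [htake1] at hrow
  have hcast0 : ((0 : Nat) : Int) = (0 : Int) := rfl
  rw [hcast0] at hrow
  have hv2 : d2.getD k [] = b0 :: dd.map (fun p => ((PySem.Dict.mk ((PySem.List.pyGet? p.2 0).getD [])).get? k).getD 0) := by
    rw [hd2, pv_outer_pointwise k dd hndh 0 d1, hc1, if_pos rfl, hv1, hrow]
    rfl
  rw [hv2]
  refine congrArg (fun row => (k, row)) ?_
  rw [PySem.Dict.getD_eq_get?_getD, List.map_map]
  refine congrArg (fun t => _ :: t) ?_
  refine List.map_congr_left ?_
  intro p _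
  simp [PySem.Dict.getD_eq_get?_getD]
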